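-- pv_equiv track=rewrite | github.com/stork119/PathwayPackage | python/modules/new_file_managment.py | _path_split
-- ===== SOURCE A (Python) =====
-- def _path_split(path):
--     possible_marks = ["\\\\","\\","//","/"]
--     ele_list = [path]
--     for mark in possible_marks:
--         output = []
--         for ele in ele_list:
--             data = ele.split(mark)
--             if len(data) > 1:
--                 for i in data:
--                     output.append(i)
--             else:
--                 output.append(data[0])
--         ele_list = output
--     output = list(filter(None, ele_list))
--     return output
-- ===== SOURCE B (Python) =====
-- def _path_split(path):
--     output = []
--     buf = ""
--     for ch in path:
--         if ch == "\\" or ch == "/":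
--             if buf:
--                 output.append(buf)
--             buf = ""
--         else:
--             buf += ch
--     if buf:
--         output.append(buf)
--     return output
-- ===== Notes on version B (the rewrite author's own statement) =====
-- stated objective: simpler
-- what changed: Replaces the four successive split-by-mark passes (each rebuilding the whole element list) with a single linear scan over the characters that flushes a token buffer at each separator character.
import Mathlib
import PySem

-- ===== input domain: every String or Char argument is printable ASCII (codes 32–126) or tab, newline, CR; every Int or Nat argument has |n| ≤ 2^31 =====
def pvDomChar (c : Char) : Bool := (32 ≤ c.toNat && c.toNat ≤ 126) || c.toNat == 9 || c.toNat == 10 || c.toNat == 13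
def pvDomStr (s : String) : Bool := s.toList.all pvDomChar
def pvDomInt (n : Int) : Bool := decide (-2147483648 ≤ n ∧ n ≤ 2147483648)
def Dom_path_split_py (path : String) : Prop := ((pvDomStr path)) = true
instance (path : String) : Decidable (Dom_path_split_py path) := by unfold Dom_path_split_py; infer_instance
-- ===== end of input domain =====

-- B replaces A's four split-by-mark passes with one linear scan flushing a token buffer; simpler, same results.

-- ===== PORT A =====
-- strings are ported through List Char (PySem.Chars), exact on the ASCII domain
def path_split_py (path : String) : List String :=
  let possible_marks : List (List Char) := [['\\','\\'], ['\\'], ['/','/'], ['/']]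
  let ele_list : List (List Char) := [path.toList]
  let ele_list := possible_marks.foldl (fun ele_list mark =>
    ele_list.foldl (fun output ele =>
      let data := PySem.Chars.splitOn ele mark
      if 1 < data.length then
        data.foldl (fun output i => output ++ [i]) output
      else
        output ++ [PySem.List.pyGetD data 0 []]) []) ele_list
  (ele_list.filter (fun s => !s.isEmpty)).map String.mk

-- ===== PORT B =====
def path_split_py_alt (path : String) : List String :=
  let st := path.toList.foldl (fun (st : List String × List Char) ch =>
    if ch = '\\' ∨ ch = '/' then
      (if st.2.isEmpty then st.1 else st.1 ++ [String.mk st.2], [])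
    else
      (st.1, st.2 ++ [ch])) ([], [])
  if st.2.isEmpty then st.1 else st.1 ++ [String.mk st.2]

-- ===== PRECONDITION & SPEC =====
def Spec_path_split_py (path : String) (out : List String) : Prop := out = path_split_py_alt path
instance (path : String) (out : List String) : Decidable (Spec_path_split_py path out) := by unfold Spec_path_split_py; infer_instance

-- ===== CLAIM (what is proved, stated in full; the proofs are below) =====
def Claim_equal_path_split_py : Prop := ∀ (path : String), Dom_path_split_py path → Spec_path_split_py path (path_split_py path)

-- ===== LEMMAS AND PROOFS =====

-- single-character split, structural form
def spc (c : Char) : List Char → List (List Char)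
  | [] => [[]]
  | x :: r => if x = c then [] :: spc c r else (spc c r).modifyHead (x :: ·)

-- two-character split (separator [c,c]), structural form
def spc2 (c : Char) : List Char → List (List Char)
  | [] => [[]]
  | x :: r =>
    if x = c ∧ r.head? = some c then [] :: spc2 c r.tail
    else (spc2 c r).modifyHead (x :: ·)
  termination_by l => l.length
  decreasing_by
    all_goals simp [List.length_tail]

theorem spc_ne_nil (c : Char) (l : List Char) : spc c l ≠ [] := by
  cases l with
  | nil => simp [spc]
  | cons x r =>
    simp only [spc]
    split
    · simp
    · exact fun h => spc_ne_nil c r (by simpa using List.modifyHead_eq_nil_iff.mp h)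

theorem spc2_ne_nil (c : Char) (l : List Char) : spc2 c l ≠ [] := by
  cases l with
  | nil => simp [spc2]
  | cons x r =>
    simp only [spc2]
    split
    · simp
    · exact fun h => spc2_ne_nil c r (by simpa using List.modifyHead_eq_nil_iff.mp h)

theorem modifyHead_idfun (l : List (List Char)) : l.modifyHead (fun x => x) = l := by
  cases l <;> simp

theorem modifyHead_modifyHead (f g : List Char → List Char) (l : List (List Char)) :
    (l.modifyHead g).modifyHead f = l.modifyHead (fun x => f (g x)) := by
  cases l <;> simp

-- ---- characterisation of PySem.Chars.splitOn for our separators ----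
theorem splitOn_go_single (c : Char) :
    ∀ (l : List Char) (fuel : Nat) (cur : List Char) (acc : List (List Char)),
      l.length < fuel →
      PySem.Chars.splitOn.go [c] fuel l cur acc
        = acc.reverse ++ (spc c l).modifyHead (cur.reverse ++ ·) := by
  intro l
  induction l with
  | nil =>
    intro fuel cur acc h
    cases fuel with
    | zero => omega
    | succ fuel =>
      rw [PySem.Chars.splitOn.go]
      · simp [spc]
      · omega
  | cons x r ih =>
    intro fuel cur acc h
    cases fuel with
    | zero => omega
    | succ fuel =>
      rw [PySem.Chars.splitOn.go]
      by_cases hx : x = c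
      · have hpre : [c].isPrefixOf (x :: r) = true := by simp [hx]
        simp only [hpre, if_true, List.length_singleton, List.drop_succ_cons, List.drop_zero]
        rw [ih fuel [] (cur.reverse :: acc) (by simp at h; omega)]
        simp [spc, hx, modifyHead_idfun]
      · have hpre : [c].isPrefixOf (x :: r) = false := by
          simp [List.isPrefixOf]
          exact fun hc => absurd hc.symm hx
        simp only [hpre, Bool.false_eq_true, if_false]
        rw [ih fuel (x :: cur) acc (by simp at h; omega)]
        simp only [spc, if_neg hx, modifyHead_modifyHead, List.reverse_cons]
        congr 2
        funext y
        simp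

theorem splitOn_single (c : Char) (l : List Char) :
    PySem.Chars.splitOn l [c] = spc c l := by
  have := splitOn_go_single c l (l.length + 1) [] [] (by omega)
  simpa [PySem.Chars.splitOn, modifyHead_idfun] using this

theorem splitOn_go_double (c : Char) :
    ∀ (n : Nat) (l : List Char) (fuel : Nat) (cur : List Char) (acc : List (List Char)),
      l.length ≤ n → l.length < fuel →
      PySem.Chars.splitOn.go [c, c] fuel l cur acc
        = acc.reverse ++ (spc2 c l).modifyHead (cur.reverse ++ ·) := by
  intro n
  induction n with
  | zero =>
    intro l fuel cur acc hn h
    have hl : l = [] := List.length_eq_zero_iff.mp (Nat.le_zero.mp hn)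
    subst hl
    cases fuel with
    | zero => omega
    | succ fuel =>
      rw [PySem.Chars.splitOn.go]
      · simp [spc2]
      · omega
  | succ n ihn =>
    intro l fuel cur acc hn h
    cases l with
    | nil =>
      cases fuel with
      | zero => omega
      | succ fuel =>
        rw [PySem.Chars.splitOn.go]
        · simp [spc2]
        · omega
    | cons x r =>
      cases fuel with
      | zero => omega
      | succ fuel =>
        rw [PySem.Chars.splitOn.go]
        by_cases hd : x = c ∧ r.head? = some c
        · obtain ⟨hx, hr⟩ := hd
          obtain ⟨y, r', rfl⟩ : ∃ y r', r = y :: r' := by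
            cases r with
            | nil => simp at hr
            | cons y r' => exact ⟨y, r', rfl⟩
          have hy : y = c := by simpa using hr
          have hpre : [c, c].isPrefixOf (x :: y :: r') = true := by
            simp [List.isPrefixOf, hx, hy]
          simp only [hpre, if_true]
          have hlen : ([c, c]).length = 2 := rfl
          rw [hlen]
          simp only [List.drop_succ_cons, List.drop_zero]
          rw [ihn r' fuel [] (cur.reverse :: acc) (by simp at hn; omega) (by simp at h; omega)]
          have hsp : spc2 c (x :: y :: r') = [] :: spc2 c r' := by
            simp [spc2, hx, hy]
          simp [hsp, modifyHead_idfun]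
        · have hpre : [c, c].isPrefixOf (x :: r) = false := by
            cases r with
            | nil => simp [List.isPrefixOf]
            | cons y r' =>
              simp only [List.isPrefixOf]
              rw [not_and_or] at hd
              rcases hd with hx | hy
              · simp [beq_iff_eq]; intro hc; exact absurd hc.symm hx
              · have : y ≠ c := by simpa using hy
                simp [beq_iff_eq]
                intro hc hyc
                exact absurd hyc.symm this
          simp only [hpre, Bool.false_eq_true, if_false]
          rw [ihn r fuel (x :: cur) acc (by simp at hn; omega) (by simp at h; omega)]
          have hsp : spc2 c (x :: r) = (spc2 c r).modifyHead (x :: ·) := by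
            rw [spc2]
            rw [if_neg hd]
          simp only [hsp, modifyHead_modifyHead, List.reverse_cons]
          congr 2
          funext z
          simp

theorem splitOn_double (c : Char) (l : List Char) :
    PySem.Chars.splitOn l [c, c] = spc2 c l := by
  have := splitOn_go_double c l.length l (l.length + 1) [] [] (le_refl _) (by omega)
  simpa [PySem.Chars.splitOn, modifyHead_idfun] using this

-- ---- algebra of the splits ----
theorem spc_append (c : Char) (u v : List Char) :
    spc c (u ++ c :: v) = spc c u ++ spc c v := by
  induction u with
  | nil => simp [spc]
  | cons x r ih =>
    by_cases hx : x = c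
    · simp [spc, hx, ih]
    · obtain ⟨h, t, hh⟩ : ∃ h t, spc c r = h :: t := by
        cases hr : spc c r with
        | nil => exact absurd hr (spc_ne_nil c r)
        | cons h t => exact ⟨h, t, rfl⟩
      simp [spc, hx, ih, hh]

theorem spc_of_noSep (c : Char) (l : List Char) (h : ∀ a ∈ l, a ≠ c) :
    spc c l = [l] := by
  induction l with
  | nil => rfl
  | cons x r ih =>
    have hx : x ≠ c := h x (by simp)
    simp [spc, hx, ih (fun a ha => h a (by simp [ha]))]

def neF (l : List Char) : Bool := !l.isEmpty

-- master lemma: flatMapping an "append-respecting" H over a double split collapses it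
theorem flatMap_spc2 (c : Char) (H : List Char → List String)
    (h2 : ∀ u v, H (u ++ c :: c :: v) = H u ++ H v) :
    ∀ (n : Nat) (cs : List Char), cs.length ≤ n → ∀ (pre : List Char),
      ((spc2 c cs).modifyHead (pre ++ ·)).flatMap H = H (pre ++ cs) := by
  intro n
  induction n with
  | zero =>
    intro cs hn pre
    have hl : cs = [] := List.length_eq_zero_iff.mp (Nat.le_zero.mp hn)
    subst hl
    simp [spc2]
  | succ n ihn =>
    intro cs hn pre
    cases cs with
    | nil => simp [spc2]
    | cons x r =>
      by_cases hd : x = c ∧ r.head? = some c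
      · obtain ⟨hx, hr⟩ := hd
        obtain ⟨y, r', rfl⟩ : ∃ y r', r = y :: r' := by
          cases r with
          | nil => simp at hr
          | cons y r' => exact ⟨y, r', rfl⟩
        have hy : y = c := by simpa using hr
        have hsp : spc2 c (x :: y :: r') = [] :: spc2 c r' := by
          simp [spc2, hx, hy]
        have hrec : (spc2 c r').flatMap H = H r' := by
          have := ihn r' (by simp at hn; omega) []
          simpa [modifyHead_idfun] using this
        subst hx hy
        simp only [hsp, List.modifyHead_cons, List.append_nil, List.flatMap_cons, hrec, h2]
      · have hsp : spc2 c (x :: r) = (spc2 c r).modifyHead (x :: ·) := by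
          rw [spc2, if_neg hd]
        have hmh : ((spc2 c r).modifyHead (x :: ·)).modifyHead (pre ++ ·)
            = (spc2 c r).modifyHead ((pre ++ [x]) ++ ·) := by
          rw [modifyHead_modifyHead]
          congr 1
          funext z
          simp
        rw [hsp, hmh, ihn r (by simp at hn; omega) (pre ++ [x])]
        simp

-- F: the innermost stage — split by '/' and drop empties (mapped to String at the end)
def Fsl (q : List Char) : List String := ((spc '/' q).filter neF).map String.mk

theorem Fsl_nil : Fsl [] = [] := by decide

theorem Fsl_sep_append (u v : List Char) :
    Fsl (u ++ '/' :: v) = Fsl u ++ Fsl v := by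
  simp [Fsl, spc_append, List.filter_append]

theorem Fsl_double (u v : List Char) :
    Fsl (u ++ '/' :: '/' :: v) = Fsl u ++ Fsl v := by
  have h : Fsl ('/' :: v) = Fsl v := by
    have h2 := Fsl_sep_append [] v
    simp only [List.nil_append] at h2
    rw [h2, Fsl_nil, List.nil_append]
  rw [Fsl_sep_append u ('/' :: v), h]

-- K': blackslash stage then F
def Ksl (q : List Char) : List String := ((spc '\\' q).flatMap Fsl)

theorem Ksl_double (u v : List Char) :
    Ksl (u ++ '\\' :: '\\' :: v) = Ksl u ++ Ksl v := by
  have h1 : spc '\\' (u ++ '\\' :: '\\' :: v) = spc '\\' u ++ [] :: spc '\\' v := by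
    have h2 := spc_append '\\' u ('\\' :: v)
    rw [h2]
    simp [spc]
  simp [Ksl, h1, Fsl_nil]

-- B's token scan, structural form
def toks (buf : List Char) : List Char → List String
  | [] => if buf.isEmpty then [] else [String.mk buf]
  | x :: r =>
    if x = '\\' ∨ x = '/' then
      (if buf.isEmpty then [] else [String.mk buf]) ++ toks [] r
    else toks (buf ++ [x]) r

theorem Fsl_noSep (pre : List Char) (h : ∀ a ∈ pre, a ≠ '\\' ∧ a ≠ '/') :
    Fsl pre = if pre.isEmpty then [] else [String.mk pre] := by
  have hsp : spc '/' pre = [pre] := spc_of_noSep '/' pre (fun a ha => (h a ha).2)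
  cases pre with
  | nil => simp [Fsl, hsp, neF]
  | cons p ps => simp [Fsl, hsp, neF]

-- A's collapsed result equals B's token scan
theorem flatMap_spc_toks :
    ∀ (cs : List Char) (pre : List Char), (∀ a ∈ pre, a ≠ '\\' ∧ a ≠ '/') →
      ((spc '\\' cs).modifyHead (pre ++ ·)).flatMap Fsl = toks pre cs := by
  intro cs
  induction cs with
  | nil =>
    intro pre hpre
    simp only [spc, List.modifyHead_cons, List.append_nil, List.flatMap_cons,
      List.flatMap_nil, List.append_nil, toks]
    rw [Fsl_noSep pre hpre]
  | cons x r ih =>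
    intro pre hpre
    by_cases hb : x = '\\'
    · subst hb
      have hrec : (spc '\\' r).flatMap Fsl = toks [] r := by
        have := ih [] (by simp)
        simpa [modifyHead_idfun] using this
      simp only [spc, if_true, List.modifyHead_cons, List.append_nil, List.flatMap_cons,
        hrec, toks, Fsl_noSep pre hpre]
      simp
    · obtain ⟨h, t, hht⟩ : ∃ h t, spc '\\' r = h :: t := by
        cases hr : spc '\\' r with
        | nil => exact absurd hr (spc_ne_nil _ r)
        | cons h t => exact ⟨h, t, rfl⟩
      by_cases hs : x = '/'
      · subst hs
        have hrec : (spc '\\' r).flatMap Fsl = toks [] r := by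
          have := ih [] (by simp)
          simpa [modifyHead_idfun] using this
        rw [hht] at hrec
        simp only [spc, if_neg hb, hht, List.modifyHead_cons, List.flatMap_cons]
        rw [Fsl_sep_append pre h]
        simp only [List.flatMap_cons] at hrec
        simp only [toks, Fsl_noSep pre hpre, List.append_assoc, hrec]
        simp
      · have hmh : ((spc '\\' r).modifyHead (x :: ·)).modifyHead (pre ++ ·)
            = (spc '\\' r).modifyHead ((pre ++ [x]) ++ ·) := by
          rw [modifyHead_modifyHead]
          congr 1
          funext z
          simp
        have hx' : ∀ a ∈ pre ++ [x], a ≠ '\\' ∧ a ≠ '/' := by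
          intro a ha
          rcases List.mem_append.mp ha with ha | ha
          · exact hpre a ha
          · simp at ha
            subst ha
            exact ⟨hb, hs⟩
        have : toks pre (x :: r) = toks (pre ++ [x]) r := by
          rw [toks, if_neg (by simp [hb, hs])]
        rw [this, ← ih (pre ++ [x]) hx', spc, if_neg hb, hmh]

-- B's foldl unwinds to toks
theorem foldB (cs : List Char) :
    ∀ (out : List String) (buf : List Char),
      (let st := cs.foldl (fun (st : List String × List Char) ch =>
        if ch = '\\' ∨ ch = '/' then
          (if st.2.isEmpty then st.1 else st.1 ++ [String.mk st.2], [])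
        else
          (st.1, st.2 ++ [ch])) (out, buf)
       if st.2.isEmpty then st.1 else st.1 ++ [String.mk st.2]) = out ++ toks buf cs := by
  induction cs with
  | nil =>
    intro out buf
    by_cases hb : buf.isEmpty <;> simp [toks, hb]
  | cons x r ih =>
    intro out buf
    by_cases hx : x = '\\' ∨ x = '/'
    · simp only [List.foldl_cons, if_pos hx]
      by_cases hb : buf.isEmpty
      · rw [if_pos hb, ih out []]
        simp [toks, hx, hb]
      · rw [if_neg hb, ih (out ++ [String.mk buf]) []]
        simp [toks, hx, hb]
    · simp only [List.foldl_cons, if_neg hx]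
      rw [ih out (buf ++ [x])]
      rw [not_or] at hx
      simp [toks, hx.1, hx.2]

-- A's inner foldl is a flatMap
theorem foldA_inner (mark : List Char) (hne : ∀ ele, PySem.Chars.splitOn ele mark ≠ [])
    (l : List (List Char)) (init : List (List Char)) :
    l.foldl (fun output ele =>
      if 1 < (PySem.Chars.splitOn ele mark).length then
        (PySem.Chars.splitOn ele mark).foldl (fun output i => output ++ [i]) output
      else
        output ++ [PySem.List.pyGetD (PySem.Chars.splitOn ele mark) 0 []]) init
    = init ++ l.flatMap (fun ele => PySem.Chars.splitOn ele mark) := by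
  induction l generalizing init with
  | nil => simp
  | cons e l' ih =>
    simp only [List.foldl_cons, List.flatMap_cons]
    have hstep : (if 1 < (PySem.Chars.splitOn e mark).length then
          (PySem.Chars.splitOn e mark).foldl (fun output i => output ++ [i]) init
        else
          init ++ [PySem.List.pyGetD (PySem.Chars.splitOn e mark) 0 []]) = init ++ PySem.Chars.splitOn e mark := by
      by_cases h1 : 1 < (PySem.Chars.splitOn e mark).length
      · simp only [if_pos h1]
        exact PySem.List.foldl_append_singleton _ _
      · simp only [if_neg h1]
        obtain ⟨d, ds, hd⟩ : ∃ d ds, PySem.Chars.splitOn e mark = d :: ds := by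
          cases hh : PySem.Chars.splitOn e mark with
          | nil => exact absurd hh (hne e)
          | cons d ds => exact ⟨d, ds, rfl⟩
        have hds : ds = [] := by
          rw [hd] at h1
          simp only [List.length_cons, not_lt] at h1
          exact List.length_eq_zero_iff.mp (by omega)
        subst hds
        rw [hd]
        simp [PySem.List.pyGetD_zero_cons]
    rw [hstep, ih]
    simp

theorem spc2_collapse_F (q : List Char) : (spc2 '/' q).flatMap Fsl = Fsl q := by
  have := flatMap_spc2 '/' Fsl Fsl_double q.length q le_rfl []
  simpa [modifyHead_idfun] using this

theorem spc2_collapse_K (q : List Char) : (spc2 '\\' q).flatMap Ksl = Ksl q := by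
  have := flatMap_spc2 '\\' Ksl Ksl_double q.length q le_rfl []
  simpa [modifyHead_idfun] using this

theorem spcb_toks (cs : List Char) : (spc '\\' cs).flatMap Fsl = toks [] cs := by
  have := flatMap_spc_toks cs [] (by simp)
  simpa [modifyHead_idfun] using this

-- ===== VERDICT (by name: the statement is the Claim_ definition above) =====
theorem path_split_py_spec : Claim_equal_path_split_py := by
  intro path _
  unfold Spec_path_split_py
  have hne1 : ∀ ele, PySem.Chars.splitOn ele ['\\','\\'] ≠ [] := fun ele => by
    rw [splitOn_double]; exact spc2_ne_nil _ _
  have hne2 : ∀ ele, PySem.Chars.splitOn ele ['\\'] ≠ [] := fun ele => by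
    rw [splitOn_single]; exact spc_ne_nil _ _
  have hne3 : ∀ ele, PySem.Chars.splitOn ele ['/','/'] ≠ [] := fun ele => by
    rw [splitOn_double]; exact spc2_ne_nil _ _
  have hne4 : ∀ ele, PySem.Chars.splitOn ele ['/'] ≠ [] := fun ele => by
    rw [splitOn_single]; exact spc_ne_nil _ _
  simp only [path_split_py, path_split_py_alt]
  rw [foldB]
  simp only [List.foldl_cons, List.foldl_nil]
  have h1 := foldA_inner _ hne1 [path.toList] []
  simp only [List.foldl_cons, List.foldl_nil, List.flatMap_cons, List.flatMap_nil,
    List.append_nil] at h1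
  rw [h1, foldA_inner _ hne2, foldA_inner _ hne3, foldA_inner _ hne4]
  simp only [List.nil_append]
  simp only [splitOn_single, splitOn_double]
  rw [List.flatMap_assoc, List.flatMap_assoc]
  simp only [List.filter_flatMap, List.map_flatMap]
  have hF : (fun ele => List.map String.mk (List.filter (fun s => !s.isEmpty) (spc '/' ele))) = Fsl := by
    funext q
    rfl
  rw [hF]
  simp only [spc2_collapse_F]
  have hK : (fun x => (spc '\\' x).flatMap Fsl) = Ksl := by
    funext q
    rfl
  rw [hK, spc2_collapse_K]
  rw [Ksl, spcb_toks]
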